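-- pv_equiv track=rewrite | github.com/paulsteven2329/Agentic-Codebase-Analyzer | graph/nodes.py | _infer_architecture
-- ===== SOURCE A (Python) =====
-- from typing import Any, TypedDict
--
-- def _infer_architecture(file_summaries: list[dict[str, Any]]) -> str:
--     roles = [str(summary.get("role_in_system", "")).lower() for summary in file_summaries]
--     if any("user interface" in role for role in roles) and any("api" in role or "service" in role for role in roles):
--         return "Layered application with separate frontend and backend responsibilities."
--     if any("api" in role for role in roles):
--         return "Service-oriented backend organized around routes and controllers."
--     if any("configuration" in role for role in roles):
--         return "Configuration-driven codebase with modular support files."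
--     return "Modular codebase organized around source files and shared utilities."
-- ===== SOURCE B (Python) =====
-- # Bitmask classification: each role contributes bits (UI=1, API=2, SERVICE=4,
-- # CONFIG=8); the OR of all bits indexes a precomputed 16-entry answer table,
-- # so there is no branch cascade at classification time.
-- _TERMS = (("user interface", 1), ("api", 2), ("service", 4), ("configuration", 8))
--
-- _LAYERED = "Layered application with separate frontend and backend responsibilities."
-- _SOA = "Service-oriented backend organized around routes and controllers."
-- _CONF = "Configuration-driven codebase with modular support files."
-- _MOD = "Modular codebase organized around source files and shared utilities."
--
-- # _ANSWERS[mask]: layered iff (mask&1) and (mask&6); else SOA iff mask&2;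
-- # else CONF iff mask&8; else modular.  Enumerated for masks 0..15:
-- _ANSWERS = (
--     _MOD,      # 0
--     _MOD,      # 1  UI
--     _SOA,      # 2  API
--     _LAYERED,  # 3  UI+API
--     _MOD,      # 4  SERVICE
--     _LAYERED,  # 5  UI+SERVICE
--     _SOA,      # 6  API+SERVICE
--     _LAYERED,  # 7  UI+API+SERVICE
--     _CONF,     # 8  CONFIG
--     _CONF,     # 9  UI+CONFIG
--     _SOA,      # 10 API+CONFIG
--     _LAYERED,  # 11 UI+API+CONFIG
--     _CONF,     # 12 SERVICE+CONFIG
--     _LAYERED,  # 13 UI+SERVICE+CONFIG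
--     _SOA,      # 14 API+SERVICE+CONFIG
--     _LAYERED,  # 15 all
-- )
--
-- def _infer_architecture(file_summaries):
--     mask = 0
--     for summary in file_summaries:
--         role = str(summary.get("role_in_system", "")).lower()
--         for term, bit in _TERMS:
--             if term in role:
--                 mask |= bit
--     return _ANSWERS[mask]
-- ===== Notes on version B (the rewrite author's own statement) =====
-- stated objective: alternative
-- what changed: Replaces the roles list, the four any() scans and the if-cascade by a single fold that ORs per-role bit masks (UI=1, API=2, SERVICE=4, CONFIG=8) into one integer which indexes a precomputed 16-entry answer table.
import Mathlib
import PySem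

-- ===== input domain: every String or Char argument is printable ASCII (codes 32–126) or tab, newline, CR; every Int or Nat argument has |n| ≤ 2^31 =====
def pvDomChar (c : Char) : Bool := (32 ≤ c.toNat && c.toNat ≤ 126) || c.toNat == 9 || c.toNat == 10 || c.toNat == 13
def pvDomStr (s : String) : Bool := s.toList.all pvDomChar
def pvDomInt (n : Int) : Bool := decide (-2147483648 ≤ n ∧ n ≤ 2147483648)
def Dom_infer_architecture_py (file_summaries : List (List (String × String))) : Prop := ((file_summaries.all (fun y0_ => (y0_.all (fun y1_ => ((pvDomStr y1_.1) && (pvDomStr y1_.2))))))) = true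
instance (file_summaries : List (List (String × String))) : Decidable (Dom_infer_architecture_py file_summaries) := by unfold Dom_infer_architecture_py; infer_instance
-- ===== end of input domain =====

-- One honest line: B replaces A's roles list, four any() scans and if-cascade by a
-- single fold ORing per-role bit masks into one integer that indexes a precomputed
-- 16-entry answer table (same cost class).

-- ===== PORT A =====
def pvRole (summary : List (String × String)) : String :=
  PySem.Str.lower ((PySem.Dict.mk summary).getD "role_in_system" "")

def infer_architecture_py (file_summaries : List (List (String × String))) : String :=
  let roles := file_summaries.map pvRole
  if roles.any (fun role => PySem.Str.isIn "user interface" role) &&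
     roles.any (fun role => PySem.Str.isIn "api" role || PySem.Str.isIn "service" role) then
    "Layered application with separate frontend and backend responsibilities."
  else if roles.any (fun role => PySem.Str.isIn "api" role) then
    "Service-oriented backend organized around routes and controllers."
  else if roles.any (fun role => PySem.Str.isIn "configuration" role) then
    "Configuration-driven codebase with modular support files."
  else
    "Modular codebase organized around source files and shared utilities."

-- ===== PORT B =====
def pvTerms : List (String × Nat) :=
  [("user interface", 1), ("api", 2), ("service", 4), ("configuration", 8)]

def pvAnswers : List String :=
  [ "Modular codebase organized around source files and shared utilities.",          -- 0
    "Modular codebase organized around source files and shared utilities.",          -- 1  UI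
    "Service-oriented backend organized around routes and controllers.",             -- 2  API
    "Layered application with separate frontend and backend responsibilities.",      -- 3
    "Modular codebase organized around source files and shared utilities.",          -- 4  SERVICE
    "Layered application with separate frontend and backend responsibilities.",      -- 5
    "Service-oriented backend organized around routes and controllers.",             -- 6
    "Layered application with separate frontend and backend responsibilities.",      -- 7
    "Configuration-driven codebase with modular support files.",                     -- 8  CONFIG
    "Configuration-driven codebase with modular support files.",                     -- 9
    "Service-oriented backend organized around routes and controllers.",             -- 10
    "Layered application with separate frontend and backend responsibilities.",      -- 11
    "Configuration-driven codebase with modular support files.",                     -- 12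
    "Layered application with separate frontend and backend responsibilities.",      -- 13
    "Service-oriented backend organized around routes and controllers.",             -- 14
    "Layered application with separate frontend and backend responsibilities." ]     -- 15

-- mask is a nonnegative Python int (0..15); represented as Nat, indexing with getD
-- (the index is always in range, so this matches Python's tuple indexing exactly).
def infer_architecture_py_alt (file_summaries : List (List (String × String))) : String :=
  let mask := file_summaries.foldl
    (fun (mask : Nat) summary =>
      let role := pvRole summary
      pvTerms.foldl (fun mask tb => if PySem.Str.isIn tb.1 role then mask ||| tb.2 else mask) mask)
    0
  pvAnswers.getD mask ""

-- ===== PRECONDITION & SPEC =====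
def Spec_infer_architecture_py (file_summaries : List (List (String × String))) (out : String) : Prop := out = infer_architecture_py_alt file_summaries
instance (file_summaries : List (List (String × String))) (out : String) : Decidable (Spec_infer_architecture_py file_summaries out) := by unfold Spec_infer_architecture_py; infer_instance

-- ===== CLAIM (what is proved, stated in full; the proofs are below) =====
def Claim_equal_infer_architecture_py : Prop := ∀ (file_summaries : List (List (String × String))), Dom_infer_architecture_py file_summaries → Spec_infer_architecture_py file_summaries (infer_architecture_py file_summaries)

-- ===== LEMMAS AND PROOFS =====

-- the bit mask contributed by the four boolean facts, right-associated
def pvMaskOf (ui api svc cfg : Bool) : Nat :=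
  (cond ui 1 0) ||| ((cond api 2 0) ||| ((cond svc 4 0) ||| (cond cfg 8 0)))

theorem pvInner_eq (m : Nat) (r : String) :
    pvTerms.foldl (fun mask tb => if PySem.Str.isIn tb.1 r then mask ||| tb.2 else mask) m =
      m ||| pvMaskOf (PySem.Str.isIn "user interface" r) (PySem.Str.isIn "api" r)
        (PySem.Str.isIn "service" r) (PySem.Str.isIn "configuration" r) := by
  simp only [pvTerms, List.foldl, pvMaskOf]
  cases PySem.Str.isIn "user interface" r <;> cases PySem.Str.isIn "api" r <;>
    cases PySem.Str.isIn "service" r <;> cases PySem.Str.isIn "configuration" r <;>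
    simp [Nat.lor_assoc]

theorem pvMaskOf_or : ∀ a b c d a' b' c' d' : Bool,
    pvMaskOf a b c d ||| pvMaskOf a' b' c' d' = pvMaskOf (a || a') (b || b') (c || c') (d || d') := by
  decide

theorem pvMask_eq (fs : List (List (String × String))) (m : Nat) :
    fs.foldl (fun (mask : Nat) summary =>
        let role := pvRole summary
        pvTerms.foldl (fun mask tb => if PySem.Str.isIn tb.1 role then mask ||| tb.2 else mask) mask) m =
      m ||| pvMaskOf (fs.any fun s => PySem.Str.isIn "user interface" (pvRole s))
        (fs.any fun s => PySem.Str.isIn "api" (pvRole s))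
        (fs.any fun s => PySem.Str.isIn "service" (pvRole s))
        (fs.any fun s => PySem.Str.isIn "configuration" (pvRole s)) := by
  induction fs generalizing m with
  | nil => simp [pvMaskOf]
  | cons s rest ih =>
    rw [List.foldl_cons, ih, pvInner_eq, Nat.lor_assoc, pvMaskOf_or]
    simp only [List.any_cons]

theorem pvAny_or (fs : List (List (String × String))) (p q : String → Bool) :
    fs.any (fun s => p (pvRole s) || q (pvRole s)) =
      (fs.any (fun s => p (pvRole s)) || fs.any (fun s => q (pvRole s))) := by
  induction fs with
  | nil => simp
  | cons s rest ih =>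
    simp only [List.any_cons, ih]
    cases p (pvRole s) <;> cases q (pvRole s) <;> simp

-- ===== VERDICT (by name: the statement is the Claim_ definition above) =====
theorem infer_architecture_py_spec : Claim_equal_infer_architecture_py := by
  intro fs _
  unfold Spec_infer_architecture_py infer_architecture_py infer_architecture_py_alt
  rw [pvMask_eq]
  simp only [Nat.zero_or, List.any_map, Function.comp_def, pvAny_or]
  cases fs.any (fun s => PySem.Str.isIn "user interface" (pvRole s)) <;>
    cases fs.any (fun s => PySem.Str.isIn "api" (pvRole s)) <;>
    cases fs.any (fun s => PySem.Str.isIn "service" (pvRole s)) <;>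
    cases fs.any (fun s => PySem.Str.isIn "configuration" (pvRole s)) <;>
    rfl
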